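-- pv_equiv track=rewrite | github.com/Next-Voters/Next-Voters-Local | utils/content/compressor.py | _reorder_for_edges
-- ===== SOURCE A (Python) =====
-- from typing import Optional
--
-- def _reorder_for_edges(segments_in_rank_order: list[str]) -> list[str]:
--     """Place the highest-ranked segments at the first and last positions.
--
--     Example: ranks [A, B, C, D, E] (best → worst) become [A, C, E, D, B] —
--     A and B at the edges, E (worst) in the middle.
--     """
--     n = len(segments_in_rank_order)
--     if n < 2:
--         return list(segments_in_rank_order)
--     out: list[Optional[str]] = [None] * n
--     front, back = 0, n - 1
--     place_front = True
--     for seg in segments_in_rank_order: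
--         if place_front:
--             out[front] = seg
--             front += 1
--         else:
--             out[back] = seg
--             back -= 1
--         place_front = not place_front
--     return [s for s in out if s is not None]
-- ===== SOURCE B (Python) =====
-- def _reorder_for_edges(segments_in_rank_order: list[str]) -> list[str]:
--     evens = segments_in_rank_order[::2]
--     odds = segments_in_rank_order[1::2]
--     return evens + odds[::-1]
-- ===== Notes on version B (the rewrite author's own statement) =====
-- stated objective: simpler
-- what changed: Replaces the preallocated None-array with two alternated front/back write pointers plus a None filter by two strided slices: result = xs[::2] + reversed(xs[1::2]).
import Mathlib
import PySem

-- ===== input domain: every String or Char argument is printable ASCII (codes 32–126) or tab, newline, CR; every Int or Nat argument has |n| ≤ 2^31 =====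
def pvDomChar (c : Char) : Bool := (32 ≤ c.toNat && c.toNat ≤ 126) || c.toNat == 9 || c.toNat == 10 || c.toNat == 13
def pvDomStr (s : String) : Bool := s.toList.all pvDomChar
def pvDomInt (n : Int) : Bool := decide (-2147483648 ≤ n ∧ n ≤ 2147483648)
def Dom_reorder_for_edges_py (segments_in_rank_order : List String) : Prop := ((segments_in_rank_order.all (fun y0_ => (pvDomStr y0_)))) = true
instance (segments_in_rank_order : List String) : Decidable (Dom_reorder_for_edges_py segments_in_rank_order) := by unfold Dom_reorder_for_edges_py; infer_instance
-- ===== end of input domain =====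

-- B replaces A's preallocated None-array with alternating front/back write pointers by two
-- strided slices, xs[::2] + reversed(xs[1::2]) — simpler, same O(n) cost.


-- ===== PORT A =====
-- one loop step of A: writes seg at front or back of the Optional array and flips the flag
def pvStepA (st : List (Option String) × Int × Int × Bool) (seg : String) :
    List (Option String) × Int × Int × Bool :=
  match st with
  | (out, front, back, place_front) =>
    if place_front then
      (PySem.List.pySetD out front (some seg), front + 1, back, !place_front)
    else
      (PySem.List.pySetD out back (some seg), front, back - 1, !place_front)

def reorder_for_edges_py (segments_in_rank_order : List String) : List String :=
  let n := segments_in_rank_order.length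
  if (n : Int) < 2 then segments_in_rank_order
  else
    let out : List (Option String) := List.replicate n none
    let st := segments_in_rank_order.foldl pvStepA (out, (0 : Int), (n : Int) - 1, true)
    -- [s for s in out if s is not None]
    st.1.filterMap id

-- ===== PORT B =====
-- slices xs[::2], xs[1::2], odds[::-1]; a slice with nonzero step never fails, .getD [] only
-- discharges the Option
def reorder_for_edges_py_alt (segments_in_rank_order : List String) : List String :=
  let evens := (PySem.List.slice? segments_in_rank_order none none 2).getD []
  let odds := (PySem.List.slice? segments_in_rank_order (some 1) none 2).getD []
  evens ++ (PySem.List.slice? odds none none (-1)).getD []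

-- ===== PRECONDITION & SPEC =====
def Spec_reorder_for_edges_py (segments_in_rank_order : List String) (out : List String) : Prop := out = reorder_for_edges_py_alt segments_in_rank_order
instance (segments_in_rank_order : List String) (out : List String) : Decidable (Spec_reorder_for_edges_py segments_in_rank_order out) := by unfold Spec_reorder_for_edges_py; infer_instance

-- ===== CLAIM (what is proved, stated in full; the proofs are below) =====
def Claim_equal_reorder_for_edges_py : Prop := ∀ (segments_in_rank_order : List String), Dom_reorder_for_edges_py segments_in_rank_order → Spec_reorder_for_edges_py segments_in_rank_order (reorder_for_edges_py segments_in_rank_order)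

-- ===== LEMMAS AND PROOFS =====

-- the elements of xs at even positions 0,2,4,…
def pvEvens {α : Type} : List α → List α
  | [] => []
  | [x] => [x]
  | x :: _ :: r => x :: pvEvens r

theorem pvEvens_cons {α : Type} (y : α) (r : List α) :
    pvEvens (y :: r) = y :: pvEvens r.tail := by
  cases r <;> rfl

theorem pvSetReplicateLast {α : Type} (m : Nat) (d v : α) :
    (List.replicate (m+1) d).set m v = List.replicate m d ++ [v] := by
  induction m with
  | zero => rfl
  | succ k ih =>
    rw [show k+1+1 = (k+1)+1 from rfl, List.replicate_succ, List.set_cons_succ, ih,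
      List.replicate_succ, List.cons_append]

-- A's loop, started on P ++ replicate xs.length none ++ S with front/back at the blank block's
-- edges, fills the blanks with evens from the left and odds from the right
theorem pvLoopA (xs : List String) (P S : List (Option String)) :
    (xs.foldl pvStepA (P ++ (List.replicate xs.length none ++ S),
        ((P.length : Int), ((P.length : Int) + xs.length - 1, true)))).1
      = P ++ ((pvEvens xs).map some ++ (((pvEvens xs.tail).map some).reverse ++ S)) := by
  induction xs using pvEvens.induct generalizing P S with
  | case1 => simp [pvEvens]
  | case2 x =>
    simp [pvEvens, pvStepA, List.replicate_succ, PySem.List.pySetD_natCast]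
  | case3 x y r ih =>
    simp only [List.foldl_cons]
    -- step 1: place x at front
    have s1 : pvStepA (P ++ (List.replicate (x :: y :: r).length none ++ S),
        ((P.length : Int), ((P.length : Int) + (x :: y :: r).length - 1, true))) x
        = (P ++ (some x :: (List.replicate (r.length+1) none ++ S)),
           ((P.length : Int) + 1, ((P.length : Int) + (x :: y :: r).length - 1, false))) := by
      simp [pvStepA, PySem.List.pySetD_natCast, List.replicate_succ]
    rw [s1]
    -- step 2: place y at back
    have hb : ((P.length : Int) + (x :: y :: r).length - 1)
        = ((P.length + r.length + 1 : Nat) : Int) := by push_cast; simp; ring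
    have hset : (P ++ some x :: (List.replicate (r.length+1) none ++ S)).set
          (P.length + r.length + 1) (some y)
        = (P ++ [some x]) ++ (List.replicate r.length none ++ (some y :: S)) := by
      rw [List.set_append, if_neg (by simp; omega)]
      have h1 : P.length + r.length + 1 - P.length = r.length + 1 := by omega
      rw [h1, List.set_cons_succ, List.set_append, if_pos (by simp), pvSetReplicateLast]
      simp
    have s2 : pvStepA (P ++ (some x :: (List.replicate (r.length+1) none ++ S)),
        ((P.length : Int) + 1, ((P.length : Int) + (x :: y :: r).length - 1, false))) y
        = ((P ++ [some x]) ++ (List.replicate r.length none ++ (some y :: S)),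
           (((P ++ [some x]).length : Int),
            (((P ++ [some x]).length : Int) + r.length - 1, true))) := by
      simp only [pvStepA, Bool.false_eq_true, if_false, hb, PySem.List.pySetD_natCast, hset]
      refine congrArg _ ?_
      simp only [List.length_append, List.length_cons, List.length_nil, Prod.mk.injEq]
      exact ⟨by push_cast; ring, by push_cast; ring, rfl⟩
    rw [s2, ih]
    rw [show (x :: y :: r).tail = y :: r from rfl, pvEvens_cons y r]
    simp [pvEvens, List.append_assoc]

theorem pvEvens_eq_filterMap {α : Type} (xs : List α) :
    List.filterMap (fun k => xs[2*k]?) (List.range ((xs.length+1)/2)) = pvEvens xs := by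
  induction xs using pvEvens.induct with
  | case1 => simp [pvEvens]
  | case2 x => simp [pvEvens]
  | case3 x y r ih =>
    have hlen : ((x :: y :: r).length + 1)/2 = (r.length+1)/2 + 1 := by
      simp [List.length_cons]; omega
    rw [hlen, List.range_succ_eq_map, List.filterMap_cons, List.filterMap_map]
    have h2 : (fun k => (x :: y :: r)[2*k]?) ∘ Nat.succ = fun k => r[2*k]? := by
      funext k
      have : 2 * (k + 1) = (2*k) + 1 + 1 := by omega
      simp [Function.comp, this, List.getElem?_cons_succ]
    rw [h2, ih]
    simp [pvEvens]

theorem pvSliceEvens (xs : List String) :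
    PySem.List.slice? xs none none 2 = some (pvEvens xs) := by
  rw [← pvEvens_eq_filterMap]
  simp only [PySem.List.slice?, PySem.List.sliceIndices]
  norm_num
  have hc : (if 0 < xs.length then (((xs.length : Int) + 2 - 1) / 2).toNat else 0)
      = (xs.length + 1) / 2 := by split <;> omega
  rw [hc]
  apply List.filterMap_congr
  intro k _
  have h1 : ((2 * (k : Int)).toNat) = 2 * k := by omega
  rw [h1]

theorem pvSliceOdds (xs : List String) :
    PySem.List.slice? xs (some 1) none 2 = some (pvEvens xs.tail) := by
  match xs with
  | [] => simp [PySem.List.slice?, PySem.List.sliceIndices, pvEvens]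
  | x :: t =>
    rw [show (x :: t).tail = t from rfl, ← pvEvens_eq_filterMap]
    simp only [PySem.List.slice?, PySem.List.sliceIndices]
    norm_num
    have hc : (if 0 < t.length then (((t.length : Int) + 2 - 1) / 2).toNat else 0)
        = (t.length + 1) / 2 := by split <;> omega
    rw [hc]
    apply List.filterMap_congr
    intro k _
    have h1 : ((1 + 2 * (k : Int)).toNat) = 2 * k + 1 := by omega
    rw [h1, List.getElem?_cons_succ]

-- ===== VERDICT (by name: the statement is the Claim_ definition above) =====
theorem reorder_for_edges_py_spec : Claim_equal_reorder_for_edges_py := by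
  intro xs _
  show reorder_for_edges_py xs = reorder_for_edges_py_alt xs
  unfold reorder_for_edges_py reorder_for_edges_py_alt
  rw [pvSliceEvens, pvSliceOdds]
  simp only [Option.getD_some, PySem.List.slice?_none_none_neg_one]
  split
  · -- n < 2 : xs = [] or [x]
    rename_i h
    match xs, h with
    | [], _ => rfl
    | [x], _ => rfl
  · have := pvLoopA xs [] []
    simp only [List.nil_append, List.append_nil, List.length_nil, Nat.cast_zero, zero_add] at this
    rw [this]
    simp [List.filterMap_append, List.filterMap_reverse]
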